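-- pv_equiv track=rewrite | github.com/genolyx/gx-exome | bin/modules/apoe_genotype.py | _enumerate_diplotypes
-- ===== SOURCE A (Python) =====
-- from itertools import product
--
-- ISO_TO_BASES = {
--     "ε2": ("T", "T"),
--     "ε3": ("T", "C"),
--     "ε4": ("C", "C"),
-- }
--
-- def _iso_sort_key(x: str) -> int:
--     return ("ε2", "ε3", "ε4").index(x)
--
-- def _enumerate_diplotypes(
--     nC_429: int,
--     nT_429: int,
--     nC_7412: int,
--     nT_7412: int,
-- ) -> list[tuple[str, str]]:
--     """All unordered ε/ε pairs consistent with observed base counts."""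
--     alleles = ("ε2", "ε3", "ε4")
--     valid: set[tuple[str, str]] = set()
--     for h1, h2 in product(alleles, repeat=2):
--         a429_1, a7412_1 = ISO_TO_BASES[h1]
--         a429_2, a7412_2 = ISO_TO_BASES[h2]
--         c429 = (1 if a429_1 == "C" else 0) + (1 if a429_2 == "C" else 0)
--         t429 = 2 - c429
--         c7412 = (1 if a7412_1 == "C" else 0) + (1 if a7412_2 == "C" else 0)
--         t7412 = 2 - c7412
--         if (c429, t429, c7412, t7412) == (nC_429, nT_429, nC_7412, nT_7412):
--             pair = tuple(sorted([h1, h2], key=_iso_sort_key))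
--             valid.add(pair)
--     return sorted(valid, key=lambda p: (_iso_sort_key(p[0]), _iso_sort_key(p[1])))
-- ===== SOURCE B (Python) =====
-- def _enumerate_diplotypes(
--     nC_429: int,
--     nT_429: int,
--     nC_7412: int,
--     nT_7412: int,
-- ) -> list[tuple[str, str]]:
--     """Closed form: each valid count signature determines a unique diplotype."""
--     n4 = nC_429            # alleles with C at 429 (only e4)
--     n3 = nC_7412 - nC_429  # alleles with C at 7412 but T at 429 (e3)
--     n2 = 2 - nC_7412       # alleles with T at both (e2)
--     if nT_429 == 2 - nC_429 and nT_7412 == 2 - nC_7412 and n2 >= 0 and n3 >= 0 and n4 >= 0: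
--         xs = ["ε2"] * n2 + ["ε3"] * n3 + ["ε4"] * n4
--         return [(xs[0], xs[1])]
--     return []
-- ===== Notes on version B (the rewrite author's own statement) =====
-- stated objective: simpler
-- what changed: Replaced the 9-pair enumeration with set-dedup and two sorts by a closed-form deduction of the unique allele counts (n4=nC_429, n3=nC_7412-nC_429, n2=2-nC_7412) plus a validity check, building the single sorted pair directly.
import Mathlib
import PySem

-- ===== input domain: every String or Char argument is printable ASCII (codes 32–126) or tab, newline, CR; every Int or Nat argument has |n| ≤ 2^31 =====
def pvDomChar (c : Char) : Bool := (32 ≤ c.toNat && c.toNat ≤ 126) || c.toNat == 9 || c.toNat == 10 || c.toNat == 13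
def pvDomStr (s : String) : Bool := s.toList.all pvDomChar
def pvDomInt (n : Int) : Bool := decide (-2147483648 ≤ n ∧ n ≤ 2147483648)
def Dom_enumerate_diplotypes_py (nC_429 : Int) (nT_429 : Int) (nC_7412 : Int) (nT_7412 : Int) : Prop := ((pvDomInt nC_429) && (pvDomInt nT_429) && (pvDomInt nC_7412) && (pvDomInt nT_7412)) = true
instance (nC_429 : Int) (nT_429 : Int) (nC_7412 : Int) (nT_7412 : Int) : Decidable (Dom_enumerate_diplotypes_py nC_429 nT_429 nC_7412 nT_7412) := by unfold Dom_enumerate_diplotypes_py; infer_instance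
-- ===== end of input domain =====

-- B replaces A's 9-pair enumeration (set + sorts) by a closed-form deduction of the
-- unique allele counts with a validity check; objective: simpler.

-- ===== PORT A =====
-- ISO_TO_BASES lookup (fixed keys, always found)
def isoToBases (x : String) : String × String :=
  if x = "ε2" then ("T", "T") else if x = "ε3" then ("T", "C") else ("C", "C")

-- _iso_sort_key: ("ε2","ε3","ε4").index(x); only ever called on these three strings, where index never raises
def isoSortKey (x : String) : Int :=
  ((PySem.List.index? ["ε2", "ε3", "ε4"] x).getD 0 : Nat)

-- the body of A's 'for h1, h2 in product(alleles, repeat=2)' loop, step for step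
def stepA (nC_429 : Int) (nT_429 : Int) (nC_7412 : Int) (nT_7412 : Int)
    (valid : PySem.Set (String × String)) (p : String × String) : PySem.Set (String × String) :=
  let h1 := p.1
  let h2 := p.2
  let a429_1 := (isoToBases h1).1
  let a7412_1 := (isoToBases h1).2
  let a429_2 := (isoToBases h2).1
  let a7412_2 := (isoToBases h2).2
  let c429 : Int := (if a429_1 = "C" then 1 else 0) + (if a429_2 = "C" then 1 else 0)
  let t429 : Int := 2 - c429
  let c7412 : Int := (if a7412_1 = "C" then 1 else 0) + (if a7412_2 = "C" then 1 else 0)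
  let t7412 : Int := 2 - c7412
  if (c429, t429, c7412, t7412) = (nC_429, nT_429, nC_7412, nT_7412) then
    -- pair = tuple(sorted([h1, h2], key=_iso_sort_key))
    let sl := PySem.List.sorted [h1, h2] (key := isoSortKey)
    PySem.Set.add valid (sl.getD 0 "", sl.getD 1 "")
  else valid

def enumerate_diplotypes_py (nC_429 : Int) (nT_429 : Int) (nC_7412 : Int) (nT_7412 : Int) : List (String × String) :=
  let alleles : List String := ["ε2", "ε3", "ε4"]
  -- product(alleles, repeat=2)
  let prod := alleles.flatMap (fun h1 => alleles.map (fun h2 => (h1, h2)))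
  let valid : PySem.Set (String × String) := prod.foldl (stepA nC_429 nT_429 nC_7412 nT_7412) PySem.Set.empty
  -- sorted(valid, key=lambda p: (key(p[0]), key(p[1]))); the key is injective on the
  -- sorted pairs in 'valid', so the result does not depend on set iteration order
  PySem.List.sorted2 valid (fun p => isoSortKey p.1) (fun p => isoSortKey p.2)

-- ===== PORT B =====
def enumerate_diplotypes_py_alt (nC_429 : Int) (nT_429 : Int) (nC_7412 : Int) (nT_7412 : Int) : List (String × String) :=
  let n4 := nC_429
  let n3 := nC_7412 - nC_429
  let n2 := 2 - nC_7412
  if nT_429 = 2 - nC_429 ∧ nT_7412 = 2 - nC_7412 ∧ 0 ≤ n2 ∧ 0 ≤ n3 ∧ 0 ≤ n4 then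
    let xs := List.replicate n2.toNat "ε2" ++ List.replicate n3.toNat "ε3" ++ List.replicate n4.toNat "ε4"
    [(xs.getD 0 "", xs.getD 1 "")]
  else []

-- ===== PRECONDITION & SPEC =====
def Spec_enumerate_diplotypes_py (nC_429 : Int) (nT_429 : Int) (nC_7412 : Int) (nT_7412 : Int) (out : List (String × String)) : Prop := out = enumerate_diplotypes_py_alt nC_429 nT_429 nC_7412 nT_7412
instance (nC_429 : Int) (nT_429 : Int) (nC_7412 : Int) (nT_7412 : Int) (out : List (String × String)) : Decidable (Spec_enumerate_diplotypes_py nC_429 nT_429 nC_7412 nT_7412 out) := by unfold Spec_enumerate_diplotypes_py; infer_instance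

-- ===== CLAIM (what is proved, stated in full; the proofs are below) =====
def Claim_equal_enumerate_diplotypes_py : Prop := ∀ (nC_429 : Int) (nT_429 : Int) (nC_7412 : Int) (nT_7412 : Int), Dom_enumerate_diplotypes_py nC_429 nT_429 nC_7412 nT_7412 → Spec_enumerate_diplotypes_py nC_429 nT_429 nC_7412 nT_7412 (enumerate_diplotypes_py nC_429 nT_429 nC_7412 nT_7412)

-- ===== LEMMAS AND PROOFS =====
-- (the verdict theorem enumerate_diplotypes_py_spec is proved directly at the bottom)

-- when the input tuple is not a pair's count signature, that loop step leaves the set unchanged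
theorem stepA_miss (a b c d : Int) (s : PySem.Set (String × String)) (p : String × String)
    (h : ¬(((if (isoToBases p.1).1 = "C" then (1:Int) else 0) + (if (isoToBases p.2).1 = "C" then 1 else 0)) = a ∧
           2 - ((if (isoToBases p.1).1 = "C" then (1:Int) else 0) + (if (isoToBases p.2).1 = "C" then 1 else 0)) = b ∧
           ((if (isoToBases p.1).2 = "C" then (1:Int) else 0) + (if (isoToBases p.2).2 = "C" then 1 else 0)) = c ∧
           2 - ((if (isoToBases p.1).2 = "C" then (1:Int) else 0) + (if (isoToBases p.2).2 = "C" then 1 else 0)) = d)) :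
    stepA a b c d s p = s := by
  unfold stepA
  rw [if_neg]
  simpa [Prod.ext_iff] using h

theorem enumerate_diplotypes_py_spec : Claim_equal_enumerate_diplotypes_py := by
  intro a b c d _
  unfold Spec_enumerate_diplotypes_py
  by_cases h1 : a = 0 ∧ b = 2 ∧ c = 0 ∧ d = 2
  · obtain ⟨rfl, rfl, rfl, rfl⟩ := h1; decide
  by_cases h2 : a = 0 ∧ b = 2 ∧ c = 1 ∧ d = 1
  · obtain ⟨rfl, rfl, rfl, rfl⟩ := h2; decide
  by_cases h3 : a = 0 ∧ b = 2 ∧ c = 2 ∧ d = 0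
  · obtain ⟨rfl, rfl, rfl, rfl⟩ := h3; decide
  by_cases h4 : a = 1 ∧ b = 1 ∧ c = 1 ∧ d = 1
  · obtain ⟨rfl, rfl, rfl, rfl⟩ := h4; decide
  by_cases h5 : a = 1 ∧ b = 1 ∧ c = 2 ∧ d = 0
  · obtain ⟨rfl, rfl, rfl, rfl⟩ := h5; decide
  by_cases h6 : a = 2 ∧ b = 0 ∧ c = 2 ∧ d = 0
  · obtain ⟨rfl, rfl, rfl, rfl⟩ := h6; decide
  · -- no valid count signature: every loop step misses and both programs return []
    have m : ∀ (s : PySem.Set (String × String)) (p : String × String),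
        p ∈ (["ε2", "ε3", "ε4"] : List String).flatMap (fun h1 => ["ε2", "ε3", "ε4"].map (fun h2 => (h1, h2))) →
        stepA a b c d s p = s := by
      intro s p hp
      fin_cases hp <;> exact stepA_miss a b c d s _ (by simp [isoToBases]; omega)
    simp only [enumerate_diplotypes_py, enumerate_diplotypes_py_alt, List.flatMap_cons,
      List.flatMap_nil, List.map_cons, List.map_nil, List.append_nil, List.cons_append,
      List.nil_append]
    rw [if_neg (by omega)]
    rw [List.foldl_cons, List.foldl_cons, List.foldl_cons, List.foldl_cons, List.foldl_cons,
        List.foldl_cons, List.foldl_cons, List.foldl_cons, List.foldl_cons, List.foldl_nil]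
    rw [m _ _ (by decide), m _ _ (by decide), m _ _ (by decide), m _ _ (by decide), m _ _ (by decide),
        m _ _ (by decide), m _ _ (by decide), m _ _ (by decide), m _ _ (by decide)]
    rfl
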